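-- pv_equiv track=rewrite | github.com/TomasFerranti/SMTools | camera_calibration.py | getCalibType
-- ===== SOURCE A (Python) =====
-- def getCalibType(data):
--     cab_type = "normal"
--     missing_idx = None
--     for dim in range(0, 3):
--         if len(data['pontosguia'][(dim) % 3]) == 0 and len(data['pontosguia'][(dim + 1) % 3]) > 0 and len(data['pontosguia'][(dim + 2) % 3]) > 0:
--             cab_type = "centrado"
--             missing_idx = dim
--             break
--     return cab_type, missing_idx
-- ===== SOURCE B (Python) =====
-- def getCalibType(data):
--     guides = data['pontosguia']
--     empties = [i for i in range(3) if len(guides[i]) == 0]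
--     if len(empties) == 1:
--         return "centrado", empties[0]
--     return "normal", None
-- ===== Notes on version B (the rewrite author's own statement) =====
-- stated objective: simpler
-- what changed: Replaces the rotating modular per-dimension scan with break by first collecting the indices of empty guide lists and returning ('centrado', i) exactly when that collection is a singleton [i].
import Mathlib
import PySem

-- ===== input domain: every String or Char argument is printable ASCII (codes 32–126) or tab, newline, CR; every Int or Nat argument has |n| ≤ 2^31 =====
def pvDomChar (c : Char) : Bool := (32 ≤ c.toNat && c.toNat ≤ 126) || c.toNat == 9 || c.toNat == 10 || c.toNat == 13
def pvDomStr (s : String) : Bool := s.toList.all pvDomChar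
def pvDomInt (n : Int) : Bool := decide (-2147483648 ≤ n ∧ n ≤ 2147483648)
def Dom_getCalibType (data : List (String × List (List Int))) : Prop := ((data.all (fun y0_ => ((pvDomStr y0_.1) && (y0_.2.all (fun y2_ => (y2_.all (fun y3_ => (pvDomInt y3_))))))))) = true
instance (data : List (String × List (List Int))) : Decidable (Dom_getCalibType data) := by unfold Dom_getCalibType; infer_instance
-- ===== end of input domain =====

-- B collects the indices of empty guide lists first and classifies by whether that
-- collection is a singleton, instead of A's rotating modular scan with break (simpler).

-- ===== PORT A =====
-- len(data['pontosguia'][i]) ; the .getD fallbacks stand for KeyError/IndexError, excluded by Pre_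
def pvLenAt (g : List (List Int)) (i : Int) : Nat := ((PySem.List.pyGet? g i).getD []).length

def getCalibTypeLoop (g : List (List Int)) : List Int → String × Option Int
  | [] => ("normal", none)
  | dim :: rest =>
    if pvLenAt g (PySem.Int.mod dim 3) = 0 ∧ 0 < pvLenAt g (PySem.Int.mod (dim + 1) 3) ∧
        0 < pvLenAt g (PySem.Int.mod (dim + 2) 3) then
      ("centrado", some dim)
    else getCalibTypeLoop g rest

def getCalibType (data : List (String × List (List Int))) : String × Option Int :=
  getCalibTypeLoop ((PySem.Dict.get? (PySem.Dict.mk data) "pontosguia").getD []) (PySem.List.pyRange 0 3 1)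

-- ===== PORT B =====
def getCalibType_alt (data : List (String × List (List Int))) : String × Option Int :=
  let guides := (PySem.Dict.get? (PySem.Dict.mk data) "pontosguia").getD []
  let empties := (PySem.List.pyRange 0 3 1).filter (fun i => pvLenAt guides i = 0)
  match empties with
  | [i] => ("centrado", some i)
  | _ => ("normal", none)

-- ===== PRECONDITION & SPEC =====
-- A raises KeyError when 'pontosguia' is absent and IndexError when it has fewer than 3 lists.
def Pre_getCalibType (data : List (String × List (List Int))) : Prop :=
  3 ≤ ((PySem.Dict.get? (PySem.Dict.mk data) "pontosguia").getD []).length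
instance (data : List (String × List (List Int))) : Decidable (Pre_getCalibType data) := by
  unfold Pre_getCalibType; infer_instance

def pvWitness_getCalibType : (List (String × List (List Int))) := [("pontosguia", [[1], [], [2]])]

def Spec_getCalibType (data : List (String × List (List Int))) (out : String × Option Int) : Prop := out = getCalibType_alt data
instance (data : List (String × List (List Int))) (out : String × Option Int) : Decidable (Spec_getCalibType data out) := by unfold Spec_getCalibType; infer_instance

-- ===== CLAIM (what is proved, stated in full; the proofs are below) =====
def Claim_equal_getCalibType : Prop := ∀ (data : List (String × List (List Int))), Dom_getCalibType data → Pre_getCalibType data → Spec_getCalibType data (getCalibType data)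

-- ===== LEMMAS AND PROOFS =====

theorem getCalibType_core (a b c : List Int) (t : List (List Int)) :
    getCalibTypeLoop (a :: b :: c :: t) (PySem.List.pyRange 0 3 1)
      = (match (PySem.List.pyRange 0 3 1).filter (fun i => pvLenAt (a :: b :: c :: t) i = 0) with
         | [i] => ("centrado", some i)
         | _ => ("normal", none)) := by
  have hr : PySem.List.pyRange 0 3 1 = [0, 1, 2] := by decide
  have h0 : pvLenAt (a :: b :: c :: t) 0 = a.length := by
    simp [pvLenAt, PySem.List.pyGet?, PySem.List.pyIdx?]
    rw [if_pos (by omega)]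
    simp
  have h1 : pvLenAt (a :: b :: c :: t) 1 = b.length := by
    simp [pvLenAt, PySem.List.pyGet?, PySem.List.pyIdx?]
    rw [if_pos (by omega)]
    simp
  have h2 : pvLenAt (a :: b :: c :: t) 2 = c.length := by
    simp [pvLenAt, PySem.List.pyGet?, PySem.List.pyIdx?]
    rw [if_pos (by omega)]
    simp
  have hm0 : PySem.Int.mod 0 3 = 0 := by decide
  have hm1 : PySem.Int.mod 1 3 = 1 := by decide
  have hm2 : PySem.Int.mod 2 3 = 2 := by decide
  have hm3 : PySem.Int.mod 3 3 = 0 := by decide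
  have hm4 : PySem.Int.mod 4 3 = 1 := by decide
  rw [hr]
  by_cases ha : a.length = 0 <;> by_cases hb : b.length = 0 <;> by_cases hc : c.length = 0 <;>
    simp_all [getCalibTypeLoop, List.filter]

-- ===== VERDICT (by name: the statement is the Claim_ definition above) =====
theorem getCalibType_spec : Claim_equal_getCalibType := by
  intro data _ hpre
  unfold Spec_getCalibType getCalibType getCalibType_alt
  unfold Pre_getCalibType at hpre
  rcases hg : (PySem.Dict.get? (PySem.Dict.mk data) "pontosguia").getD [] with _ | ⟨a, rest⟩
  · rw [hg] at hpre; simp at hpre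
  · rcases rest with _ | ⟨b, rest2⟩
    · rw [hg] at hpre; simp at hpre
    · rcases rest2 with _ | ⟨c, t⟩
      · rw [hg] at hpre; simp at hpre
      · exact getCalibType_core a b c t
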